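-- pv_equiv track=rewrite | github.com/BuilderBenv1/brain-v | scripts/run_density_diagnosis.py | per_token_suffix_dealer_counts
-- ===== SOURCE A (Python) =====
-- CORE_SET = {"t", "p", "k", "f", "cth", "cph", "ckh", "cfh"}
--
-- CRUST_SET = {"d", "l", "r", "s", "n", "x", "i", "m", "g", "q", "o", "y", "a", "e"}
--
-- def per_token_suffix_dealer_counts(tokens):
--     counts = []
--     for t in tokens:
--         if not t or t[0] == "q":
--             continue
--         core_positions = [i for i, g in enumerate(t) if g in CORE_SET]
--         if not core_positions:
--             continue
--         first_core = core_positions[0]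
--         suffix = t[first_core + 1:]
--         counts.append(sum(1 for g in suffix if g in CRUST_SET))
--     return counts
-- ===== SOURCE B (Python) =====
-- CORE_SET = {"t", "p", "k", "f", "cth", "cph", "ckh", "cfh"}
--
-- CRUST_SET = {"d", "l", "r", "s", "n", "x", "i", "m", "g", "q", "o", "y", "a", "e"}
--
-- def per_token_suffix_dealer_counts(tokens):
--     counts = []
--     for t in tokens:
--         if not t or t[0] == "q":
--             continue
--         found = False
--         count = 0
--         for g in t:
--             if found:
--                 if g in CRUST_SET:
--                     count += 1
--             elif g in CORE_SET:
--                 found = True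
--         if found:
--             counts.append(count)
--     return counts
-- ===== Notes on version B (the rewrite author's own statement) =====
-- stated objective: faster
-- what changed: Replaces the build-all-core-positions-then-slice-and-count two-pass pattern with a single stateful pass per token (a found flag and a running crust counter), so no position list, no slice and no second scan are built.
import Mathlib
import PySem

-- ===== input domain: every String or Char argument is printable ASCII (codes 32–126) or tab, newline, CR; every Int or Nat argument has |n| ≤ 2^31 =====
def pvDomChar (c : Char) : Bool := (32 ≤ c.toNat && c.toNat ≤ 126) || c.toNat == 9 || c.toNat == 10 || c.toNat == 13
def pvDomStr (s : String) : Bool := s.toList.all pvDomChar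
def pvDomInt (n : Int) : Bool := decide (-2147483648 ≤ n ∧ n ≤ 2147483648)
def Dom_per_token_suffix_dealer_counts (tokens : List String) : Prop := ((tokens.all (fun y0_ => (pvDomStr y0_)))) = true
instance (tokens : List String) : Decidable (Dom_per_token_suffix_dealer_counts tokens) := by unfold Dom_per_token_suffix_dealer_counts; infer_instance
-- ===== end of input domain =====

-- B fuses A's two scans (collect all core positions, then slice and count) into one
-- stateful pass per token with a found flag and a running counter; same results.

-- ===== PORT A =====
def pvCoreSet : List String := ["t", "p", "k", "f", "cth", "cph", "ckh", "cfh"]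
def pvCrustSet : List String := ["d", "l", "r", "s", "n", "x", "i", "m", "g", "q", "o", "y", "a", "e"]

-- literal port of A: the 'g in CORE_SET' test compares the one-char string String.ofList [g]
-- to the set's members, exactly as Python compares strings
def per_token_suffix_dealer_counts (tokens : List String) : List Int :=
  tokens.foldl (fun counts t =>
    match t.toList with
    | [] => counts                                   -- not t
    | c :: _ =>
      if String.ofList [c] = "q" then counts             -- t[0] == "q"
      else
        let cs := t.toList
        let core_positions :=
          ((PySem.List.enumerate cs 0).filter (fun p => String.ofList [p.2] ∈ pvCoreSet)).map Prod.fst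
        match core_positions with
        | [] => counts
        | first_core :: _ =>
          let suffix := PySem.List.slice cs (some (first_core + 1)) none   -- t[first_core+1:]
          counts ++ [suffix.foldl (fun acc g => acc + (if String.ofList [g] ∈ pvCrustSet then 1 else 0)) 0]
  ) []

-- ===== PORT B =====
-- single pass: found flag + crust counter (port of Source B's inner for-loop)
def pvGo : List Char → Bool → Int → Bool × Int
  | [], found, count => (found, count)
  | g :: rest, found, count =>
    if found then
      pvGo rest found (count + (if String.ofList [g] ∈ pvCrustSet then 1 else 0))
    else if String.ofList [g] ∈ pvCoreSet then
      pvGo rest true count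
    else
      pvGo rest false count

def per_token_suffix_dealer_counts_alt (tokens : List String) : List Int :=
  tokens.foldl (fun counts t =>
    match t.toList with
    | [] => counts
    | c :: _ =>
      if c = 'q' then counts
      else
        let r := pvGo t.toList false 0
        if r.1 then counts ++ [r.2] else counts
  ) []

-- ===== PRECONDITION & SPEC =====
def Spec_per_token_suffix_dealer_counts (tokens : List String) (out : List Int) : Prop := out = per_token_suffix_dealer_counts_alt tokens
instance (tokens : List String) (out : List Int) : Decidable (Spec_per_token_suffix_dealer_counts tokens out) := by unfold Spec_per_token_suffix_dealer_counts; infer_instance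

-- ===== CLAIM (what is proved, stated in full; the proofs are below) =====
def Claim_equal_per_token_suffix_dealer_counts : Prop := ∀ (tokens : List String), Dom_per_token_suffix_dealer_counts tokens → Spec_per_token_suffix_dealer_counts tokens (per_token_suffix_dealer_counts tokens)

-- ===== LEMMAS AND PROOFS =====

-- first core index of a char list, recursively
def pvFci : List Char → Option Nat
  | [] => none
  | c :: cs => if String.ofList [c] ∈ pvCoreSet then some 0 else (pvFci cs).map (· + 1)

-- crust count, as a closed value
def pvCrustCount (cs : List Char) : Int :=
  ((cs.filter (fun g => String.ofList [g] ∈ pvCrustSet)).length : Int)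

theorem pv_foldl_crust (cs : List Char) (n : Int) :
    cs.foldl (fun acc g => acc + (if String.ofList [g] ∈ pvCrustSet then 1 else 0)) n
      = n + pvCrustCount cs := by
  induction cs generalizing n with
  | nil => simp [pvCrustCount]
  | cons c cs ih =>
    by_cases h : String.ofList [c] ∈ pvCrustSet <;>
      simp [List.foldl_cons, ih, pvCrustCount, h]; ring

theorem pv_go_true (cs : List Char) (n : Int) :
    pvGo cs true n = (true, n + pvCrustCount cs) := by
  induction cs generalizing n with
  | nil => simp [pvGo, pvCrustCount]
  | cons c cs ih =>
    by_cases h : String.ofList [c] ∈ pvCrustSet <;>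
      simp [pvGo, ih, pvCrustCount, h]; ring

-- head of A's filtered enumerate, in terms of pvFci
theorem pv_head_fe (cs : List Char) (k : Nat) :
    ((((PySem.List.enumerate cs (k : Int)).filter (fun p => String.ofList [p.2] ∈ pvCoreSet)).map Prod.fst).head?)
      = (pvFci cs).map (fun j => ((k + j : Nat) : Int)) := by
  induction cs generalizing k with
  | nil => simp [PySem.List.enumerate_nil, pvFci]
  | cons c cs ih =>
    rw [PySem.List.enumerate_cons]
    by_cases h : String.ofList [c] ∈ pvCoreSet
    · simp [pvFci, h]
    · have hcast : (k : Int) + 1 = ((k + 1 : Nat) : Int) := by push_cast; ring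
      rw [hcast]
      simp only [List.filter_cons, h, decide_false, Bool.false_eq_true, if_false, ih, pvFci]
      cases pvFci cs
      · simp
      · simp; ring

-- pvGo from the not-found state, in terms of pvFci and pvCrustCount
theorem pv_go_false (cs : List Char) :
    (if (pvGo cs false 0).1 then some (pvGo cs false 0).2 else none)
      = (pvFci cs).map (fun j => pvCrustCount (cs.drop (j + 1))) := by
  induction cs with
  | nil => simp [pvGo, pvFci]
  | cons c cs ih =>
    by_cases h : String.ofList [c] ∈ pvCoreSet
    · simp [pvGo, pvFci, h, pv_go_true]
    · simp only [pvGo, pvFci, h, Bool.false_eq_true, if_false]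
      rw [ih]
      cases pvFci cs <;> simp

theorem pv_mk_q (c : Char) : (String.ofList [c] = "q") ↔ (c = 'q') := by
  rw [show ("q" : String) = String.ofList ['q'] from rfl, String.ofList_inj]
  simp

theorem pv_step_eq :
    (fun (counts : List Int) (t : String) =>
      match t.toList with
      | [] => counts
      | c :: _ =>
        if String.ofList [c] = "q" then counts
        else
          let cs := t.toList
          let core_positions :=
            ((PySem.List.enumerate cs 0).filter (fun p => String.ofList [p.2] ∈ pvCoreSet)).map Prod.fst
          match core_positions with
          | [] => counts
          | first_core :: _ =>
            let suffix := PySem.List.slice cs (some (first_core + 1)) none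
            counts ++ [suffix.foldl (fun acc g => acc + (if String.ofList [g] ∈ pvCrustSet then 1 else 0)) 0])
    = (fun (counts : List Int) (t : String) =>
      match t.toList with
      | [] => counts
      | c :: _ =>
        if c = 'q' then counts
        else
          let r := pvGo t.toList false 0
          if r.1 then counts ++ [r.2] else counts) := by
  funext counts t
  cases hts : t.toList with
  | nil => rfl
  | cons c rest =>
    simp only [pv_mk_q]
    by_cases hc : c = 'q'
    · simp [hc]
    · rw [if_neg hc, if_neg hc]
      have hhead := pv_head_fe (c :: rest) 0
      have hgo := pv_go_false (c :: rest)
      simp only [Nat.cast_zero, Nat.zero_add] at hhead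
      cases hfe : (((PySem.List.enumerate ((c :: rest) : List Char)).filter
            (fun p => String.ofList [p.2] ∈ pvCoreSet)).map Prod.fst) with
      | nil =>
        rw [hfe] at hhead
        simp only [List.head?_nil] at hhead
        have hj : pvFci (c :: rest) = none := by
          cases h : pvFci (c :: rest)
          · rfl
          · rw [h] at hhead; simp at hhead
        rw [hj] at hgo
        simp only [Option.map_none] at hgo
        cases hb : (pvGo ((c : Char) :: rest) false 0).1
        · simp
        · rw [hb] at hgo; simp at hgo
      | cons fc tl =>
        rw [hfe] at hhead
        simp only [List.head?_cons] at hhead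
        cases hj : pvFci (c :: rest) with
        | none => rw [hj] at hhead; simp at hhead
        | some j =>
          rw [hj] at hhead hgo
          simp only [Option.map_some] at hhead hgo
          have hfc : fc = ((j : Int)) := by
            have := hhead; simp at this; omega
          have hslice : PySem.List.slice ((c :: rest) : List Char) (some (fc + 1)) none
              = (c :: rest).drop (j + 1) := by
            rw [hfc]
            have h1 : ((j : Int)) + 1 = (((j + 1 : Nat)) : Int) := by push_cast; ring
            rw [h1, PySem.List.slice_from_natCast]
          simp only [hslice, pv_foldl_crust]
          cases hb : (pvGo ((c : Char) :: rest) false 0).1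
          · rw [hb] at hgo; simp at hgo
          · rw [hb] at hgo
            simp at hgo
            rw [if_pos rfl, hgo]
            simp

-- ===== VERDICT (by name: the statement is the Claim_ definition above) =====
theorem per_token_suffix_dealer_counts_spec : Claim_equal_per_token_suffix_dealer_counts := by
  intro tokens _
  unfold Spec_per_token_suffix_dealer_counts per_token_suffix_dealer_counts per_token_suffix_dealer_counts_alt
  rw [pv_step_eq]
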